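-- pv_equiv track=rewrite | github.com/jinyes-kim/Algorithm | programmers/level1/모의고사.py | second_man
-- ===== SOURCE A (Python) =====
-- def second_man(length):
--     result = []
--
--     for n in range(0, length):
--         if len(result) >= length:
--             break
--
--         num = (n % 5) + 1
--         if num == 2:
--             continue
--         else:
--             result.append(2)
--             result.append(num)
--
--     return result
-- ===== SOURCE B (Python) =====
-- def second_man(length):
--     pairs = (length + 1) // 2
--     cycle = [1, 3, 4, 5]
--     out = []
--     for j in range(pairs):
--         out.append(2)
--         out.append(cycle[j % 4])
--     return out
-- ===== Notes on version B (the rewrite author's own statement) =====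
-- stated objective: simpler
-- what changed: Replaces the break-on-length loop with continue-skips by a directly computed pair count (length+1)//2 and a mod-4 value cycle [1,3,4,5], emitting exactly the needed pairs with no skip or break.
import Mathlib
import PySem

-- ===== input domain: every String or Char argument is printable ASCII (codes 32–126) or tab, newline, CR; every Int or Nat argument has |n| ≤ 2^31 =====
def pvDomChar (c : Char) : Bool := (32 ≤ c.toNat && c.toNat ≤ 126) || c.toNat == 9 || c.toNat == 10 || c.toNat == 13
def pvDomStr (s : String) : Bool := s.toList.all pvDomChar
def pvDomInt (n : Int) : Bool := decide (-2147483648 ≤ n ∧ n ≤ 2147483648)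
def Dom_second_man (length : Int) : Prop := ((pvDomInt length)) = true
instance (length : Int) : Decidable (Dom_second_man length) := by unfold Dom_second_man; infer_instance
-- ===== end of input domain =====

-- B replaces A's break-on-length loop with skips by a directly computed pair count
-- (length+1)//2 and a mod-4 value cycle [1,3,4,5] (objective: simpler).

-- ===== PORT A =====
-- the for-loop with its early 'break' and 'continue', recursing over the range list
def second_man_loop : List Int → List Int → Int → List Int
  | [], result, _ => result
  | n :: rest, result, length =>
    if length ≤ (result.length : Int) then result
    else
      let num := PySem.Int.mod n 5 + 1
      if num = 2 then second_man_loop rest result length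
      else second_man_loop rest (result ++ [2, num]) length

def second_man (length : Int) : List Int :=
  second_man_loop (PySem.List.pyRange 0 length 1) [] length

-- ===== PORT B =====
def second_man_alt_loop : List Int → List Int → List Int
  | [], out => out
  | j :: rest, out =>
    second_man_alt_loop rest
      (out ++ [2, PySem.List.pyGetD [1, 3, 4, 5] (PySem.Int.mod j 4) 0])

def second_man_alt (length : Int) : List Int :=
  second_man_alt_loop (PySem.List.pyRange 0 (PySem.Int.floordiv (length + 1) 2) 1) []

-- ===== PRECONDITION & SPEC =====
def Spec_second_man (length : Int) (out : List Int) : Prop := out = second_man_alt length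
instance (length : Int) (out : List Int) : Decidable (Spec_second_man length out) := by unfold Spec_second_man; infer_instance

-- ===== CLAIM (what is proved, stated in full; the proofs are below) =====
def Claim_equal_second_man : Prop := ∀ (length : Int), Dom_second_man length → Spec_second_man length (second_man length)

-- ===== LEMMAS AND PROOFS =====

-- value of the j-th pair, as a function of the pair index
def pvCyc (j : Int) : Int :=
  if j % 4 = 0 then 1 else if j % 4 = 1 then 3 else if j % 4 = 2 then 4 else 5

-- the list of pairs for indices j, j+1, …, j+m-1
def pvSeg (j : Int) : Nat → List Int
  | 0 => []
  | m + 1 => [2, pvCyc j] ++ pvSeg (j + 1) m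

theorem pvSeg_snoc (j : Int) (m : Nat) :
    pvSeg j (m + 1) = pvSeg j m ++ [2, pvCyc (j + m)] := by
  induction m generalizing j with
  | zero => simp [pvSeg]
  | succ m ih =>
    show [2, pvCyc j] ++ pvSeg (j + 1) (m + 1) = ([2, pvCyc j] ++ pvSeg (j + 1) m) ++ _
    rw [ih (j + 1)]
    simp
    ring_nf

theorem pvSeg_length (j : Int) (m : Nat) : (pvSeg j m).length = 2 * m := by
  induction m generalizing j with
  | zero => simp [pvSeg]
  | succ m ih => simp [pvSeg, ih]; omega

theorem pvCyc_getD (j : Int) (_hj : 0 ≤ j) :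
    PySem.List.pyGetD [1, 3, 4, 5] (PySem.Int.mod j 4) 0 = pvCyc j := by
  rw [PySem.Int.mod_eq_emod_of_pos (show (0:Int) < _ by norm_num)]
  have h : j % 4 = 0 ∨ j % 4 = 1 ∨ j % 4 = 2 ∨ j % 4 = 3 := by omega
  rcases h with h | h | h | h <;>
    simp [h, pvCyc, PySem.List.pyGetD, PySem.List.pyGet?, PySem.List.pyIdx?]

-- B's loop over a range appends exactly the segment of pairs
theorem alt_loop_seg (m : Nat) : ∀ (j b : Int) (out : List Int),
    0 ≤ j → (b - j).toNat = m →
    second_man_alt_loop (PySem.List.pyRange j b 1) out = out ++ pvSeg j m := by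
  induction m with
  | zero =>
    intro j b out hj hm
    rw [PySem.List.pyRange_one_eq_nil (by omega)]
    simp [second_man_alt_loop, pvSeg]
  | succ m ih =>
    intro j b out hj hm
    rw [PySem.List.pyRange_one_cons (by omega)]
    show second_man_alt_loop _ _ = _
    simp only [second_man_alt_loop]
    rw [ih (j + 1) b _ (by omega) (by omega), pvCyc_getD j hj]
    simp [pvSeg]

-- A's loop invariant: having emitted p pairs after scanning n indices,
-- with p = n - (n+3)/5 and 2p ≤ length+1, it finishes with (length+1)/2 pairs.
theorem a_loop_inv (m : Nat) : ∀ (n p length : Int),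
    0 ≤ n → 0 ≤ p → (length - n).toNat = m →
    p = n - (n + 3) / 5 → 2 * p ≤ length + 1 →
    second_man_loop (PySem.List.pyRange n length 1) (pvSeg 0 p.toNat) length
      = pvSeg 0 ((length + 1) / 2).toNat := by
  induction m with
  | zero =>
    intro n p length hn hp hm hrel hbound
    rw [PySem.List.pyRange_one_eq_nil (by omega)]
    simp only [second_man_loop]
    have h2 : length ≤ 2 * p := by omega
    have : p.toNat = ((length + 1) / 2).toNat := by omega
    rw [this]
  | succ m ih =>
    intro n p length hn hp hm hrel hbound
    rw [PySem.List.pyRange_one_cons (by omega)]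
    simp only [second_man_loop, pvSeg_length]
    by_cases hbrk : length ≤ (2 * p.toNat : Int)
    · rw [if_pos (by exact_mod_cast hbrk)]
      have : p.toNat = ((length + 1) / 2).toNat := by omega
      rw [this]
    · rw [if_neg (by exact_mod_cast hbrk)]
      rw [PySem.Int.mod_eq_emod_of_pos (show (0:Int) < _ by norm_num)]
      by_cases hskip : n % 5 + 1 = 2
      · rw [if_pos hskip]
        exact ih (n + 1) p length (by omega) hp (by omega) (by omega) (by omega)
      · rw [if_neg hskip]
        have hval : n % 5 + 1 = pvCyc p := by
          have h5 : n % 5 = 0 ∨ n % 5 = 2 ∨ n % 5 = 3 ∨ n % 5 = 4 := by omega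
        
          rcases h5 with h | h | h | h <;>
            · have hp4 : p % 4 = n % 5 - (if n % 5 = 0 then 0 else 1) := by omega
              simp [pvCyc, h] at hp4 ⊢; omega
        have hstep : pvSeg 0 p.toNat ++ [2, n % 5 + 1] = pvSeg 0 (p + 1).toNat := by
          have : (p + 1).toNat = p.toNat + 1 := by omega
          rw [this, pvSeg_snoc, hval]
          have : ((0 : Int) + (p.toNat : Int)) = p := by omega
          rw [this]
        rw [hstep]
        exact ih (n + 1) (p + 1) length (by omega) (by omega) (by omega) (by omega) (by omega)

-- ===== VERDICT (by name: the statement is the Claim_ definition above) =====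
theorem second_man_spec : Claim_equal_second_man := by
  intro length _
  show second_man length = second_man_alt length
  unfold second_man second_man_alt
  rw [PySem.Int.floordiv_eq_ediv_of_pos (show (0:Int) < 2 by norm_num)]
  by_cases hpos : 0 < length
  · have hA := a_loop_inv (length).toNat 0 0 length le_rfl le_rfl (by omega) (by omega)
      (by omega)
    simp only [Int.toNat_zero] at hA
    rw [show pvSeg 0 0 = ([] : List Int) from rfl] at hA
    rw [hA]
    rw [alt_loop_seg ((length + 1) / 2).toNat 0 ((length + 1) / 2) [] le_rfl (by omega)]
    simp
  · rw [PySem.List.pyRange_one_eq_nil (by omega),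
      PySem.List.pyRange_one_eq_nil (by omega)]
    rfl
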